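-- pv_equiv track=rewrite | github.com/LukaSveigl/ULFRI-undergrad-coursework | year1/semester-1/programming-1 (P1)/Izpit/testi.py | identifikator
-- ===== SOURCE A (Python) =====
-- def identifikator(pozitivni, negativni, fragmenti):
--     most = 0
--     most_fragment = ""
--     for frag in fragmenti:
--         count = 0
--         for poz in pozitivni:
--             if frag in poz:
--                 count += 1
--         for neg in negativni:
--             if frag in neg:
--                 count -= 1
--         if count > most:
--             most = count
--             most_fragment = frag
--     return most_fragment
-- ===== SOURCE B (Python) =====
-- def identifikator(pozitivni, negativni, fragmenti):
--     # Sort-then-select: stable descending sort by score; the head of the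
--     # ranking is the first fragment attaining the maximal score.
--     def score(frag):
--         return (sum(1 for poz in pozitivni if frag in poz)
--                 - sum(1 for neg in negativni if frag in neg))
--     ranked = sorted(fragmenti, key=score, reverse=True)
--     if ranked and score(ranked[0]) > 0:
--         return ranked[0]
--     return ""
-- ===== Notes on version B (the rewrite author's own statement) =====
-- stated objective: alternative
-- what changed: Replaces the streaming running-max accumulator with sort-then-select: fragments are ranked by a stable descending sort on their score and the head of the ranking (the first fragment attaining the maximal score) is returned when its score is positive, else the empty string.
import Mathlib
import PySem

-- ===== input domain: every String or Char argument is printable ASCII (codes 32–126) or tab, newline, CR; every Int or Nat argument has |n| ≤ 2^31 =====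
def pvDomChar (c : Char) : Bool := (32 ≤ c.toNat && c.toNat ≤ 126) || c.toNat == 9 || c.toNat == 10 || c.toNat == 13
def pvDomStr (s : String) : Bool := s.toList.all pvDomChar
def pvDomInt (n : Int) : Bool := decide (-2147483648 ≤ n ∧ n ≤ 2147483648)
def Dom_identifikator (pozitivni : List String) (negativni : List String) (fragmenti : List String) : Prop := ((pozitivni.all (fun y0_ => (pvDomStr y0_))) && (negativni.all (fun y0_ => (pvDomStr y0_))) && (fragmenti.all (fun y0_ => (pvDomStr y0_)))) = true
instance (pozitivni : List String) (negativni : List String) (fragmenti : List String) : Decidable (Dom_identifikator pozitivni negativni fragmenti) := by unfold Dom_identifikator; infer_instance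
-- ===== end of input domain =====

-- B replaces A's streaming running-max accumulator with sort-then-select: a stable
-- descending sort ranks the fragments by score and the head of the ranking is
-- returned when its score is positive; same asymptotic cost, alternative structure.

-- ===== PORT A =====
-- per-fragment nested scan, updating (most, most_fragment) as A does
def identifikator (pozitivni : List String) (negativni : List String) (fragmenti : List String) : String :=
  (fragmenti.foldl
    (fun (acc : Int × String) frag =>
      let count : Int := pozitivni.foldl (fun c poz => if PySem.Str.isIn frag poz then c + 1 else c) 0
      let count : Int := negativni.foldl (fun c neg => if PySem.Str.isIn frag neg then c - 1 else c) count
      if count > acc.1 then (count, frag) else acc)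
    ((0 : Int), "")).2

-- ===== PORT B =====
-- score(frag) = sum(1 for poz in pozitivni if frag in poz) - sum(1 for neg in negativni if frag in neg)
def pvScoreB (pozitivni : List String) (negativni : List String) (frag : String) : Int :=
  ((pozitivni.filter (fun poz => PySem.Str.isIn frag poz)).map (fun _ => (1 : Int))).sum
  - ((negativni.filter (fun neg => PySem.Str.isIn frag neg)).map (fun _ => (1 : Int))).sum

-- ranked = sorted(fragmenti, key=score, reverse=True); head wins if its score > 0
def identifikator_alt (pozitivni : List String) (negativni : List String) (fragmenti : List String) : String :=
  match PySem.List.sorted fragmenti (fun f => pvScoreB pozitivni negativni f) true with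
  | [] => ""
  | m :: _ => if pvScoreB pozitivni negativni m > 0 then m else ""

-- ===== PRECONDITION & SPEC =====
def Spec_identifikator (pozitivni : List String) (negativni : List String) (fragmenti : List String) (out : String) : Prop := out = identifikator_alt pozitivni negativni fragmenti
instance (pozitivni : List String) (negativni : List String) (fragmenti : List String) (out : String) : Decidable (Spec_identifikator pozitivni negativni fragmenti out) := by unfold Spec_identifikator; infer_instance

-- ===== CLAIM =====
def Claim_equal_identifikator : Prop := ∀ (pozitivni : List String) (negativni : List String) (fragmenti : List String), Dom_identifikator pozitivni negativni fragmenti → Spec_identifikator pozitivni negativni fragmenti (identifikator pozitivni negativni fragmenti)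

-- ===== LEMMAS AND PROOFS =====

-- A's inner negative loop subtracts one per match
theorem foldl_if_sub_one {α : Type} (p : α → Bool) (l : List α) (c : Int) :
    l.foldl (fun c x => if p x then c - 1 else c) c = c - (l.countP p : Int) := by
  induction l generalizing c with
  | nil => simp
  | cons x xs ih =>
    by_cases h : p x <;> simp [h, ih] <;> omega

-- A's inline count equals B's score
theorem scoreA_eq (pozitivni negativni : List String) (frag : String) :
    negativni.foldl (fun c neg => if PySem.Str.isIn frag neg then c - 1 else c)
      (pozitivni.foldl (fun c poz => if PySem.Str.isIn frag poz then c + 1 else c) 0)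
    = pvScoreB pozitivni negativni frag := by
  rw [PySem.List.foldl_if_add_one, foldl_if_sub_one]
  simp [pvScoreB, List.map_const', List.sum_replicate, List.countP_eq_length_filter]
  rfl

-- the state A's running-max loop carries, read off a descending ranking
def pvBest (key : String → Int) : List String → Int × String
  | [] => (0, "")
  | m :: _ => if key m > 0 then (key m, m) else (0, "")

-- one insertion step of the stable descending insertion sort matches one step of A's loop
theorem pvBest_insertBy (key : String → Int) (x : String) (L : List String) :
    pvBest key (PySem.List.insertBy (fun a b => decide (key b < key a)) x L)
      = (fun (acc : Int × String) f => if key f > acc.1 then (key f, f) else acc) (pvBest key L) x := by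
  cases L with
  | nil => simp [PySem.List.insertBy, pvBest]
  | cons m t =>
    simp only [PySem.List.insertBy, pvBest]
    by_cases h : key m < key x
    · by_cases h0 : key m > 0 <;> simp [h, h0] <;> omega
    · by_cases h0 : key m > 0 <;> simp [h, h0] <;> omega

-- the whole loop: A's fold from any ranking-consistent state equals pvBest of the sorted list
theorem pvBest_foldl (key : String → Int) (xs : List String) (L : List String) :
    xs.foldl (fun (acc : Int × String) f => if key f > acc.1 then (key f, f) else acc) (pvBest key L)
      = pvBest key (xs.foldl (fun acc x => PySem.List.insertBy (fun a b => decide (key b < key a)) x acc) L) := by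
  induction xs generalizing L with
  | nil => rfl
  | cons x xs ih =>
    simp only [List.foldl_cons, ← pvBest_insertBy key x L]
    exact ih _

-- ===== VERDICT =====
theorem identifikator_spec : Claim_equal_identifikator := by
  intro pozitivni negativni fragmenti _
  unfold Spec_identifikator identifikator identifikator_alt
  have hfun : (fun (acc : Int × String) frag =>
      let count : Int := pozitivni.foldl (fun c poz => if PySem.Str.isIn frag poz then c + 1 else c) 0
      let count : Int := negativni.foldl (fun c neg => if PySem.Str.isIn frag neg then c - 1 else c) count
      if count > acc.1 then (count, frag) else acc)
      = (fun (acc : Int × String) f => if pvScoreB pozitivni negativni f > acc.1 then (pvScoreB pozitivni negativni f, f) else acc) := by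
    funext acc frag
    simp only [scoreA_eq]
  rw [hfun]
  have h0 : ((0 : Int), "") = pvBest (pvScoreB pozitivni negativni) [] := rfl
  rw [h0, pvBest_foldl, ← PySem.List.sorted_rev_eq_foldl_insertBy]
  cases h : PySem.List.sorted fragmenti (fun f => pvScoreB pozitivni negativni f) true with
  | nil => simp [pvBest]
  | cons m t =>
    by_cases hm : pvScoreB pozitivni negativni m > 0 <;> simp [pvBest, hm]
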